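-- pv_equiv track=rewrite | github.com/marinasupernova/codewars | 26-dashtize-it/index.py | dashatize
-- ===== SOURCE A (Python) =====
-- def dashatize(nums):
--
--     if nums == None:
--         return 'None'
--     if nums < 0:
--         nums = abs(nums)
--
--     dashtize_nums = ""
--
--     digits = list(str(nums))
--
--     for digit in digits:
--         if int(digit) % 2 == 1:
--             dashtize_nums += "-" + digit + "-"
--         else:
--             dashtize_nums += digit
--     if dashtize_nums[0] == "-":
--         dashtize_nums = dashtize_nums[1:]
--     if dashtize_nums[-1] == "-":
--         dashtize_nums = dashtize_nums[:-1]
--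
--     dashtize_nums = dashtize_nums.replace("--", "-")
--
--
--     return dashtize_nums
-- ===== SOURCE B (Python) =====
-- def dashatize(nums):
--     # Simpler: compute each separator directly from the adjacent pair of digits
--     # (dash iff previous or current digit is odd) instead of wrap-then-cleanup.
--     if nums is None:
--         return 'None'
--     s = str(abs(nums))
--     res = s[0]
--     for p, d in zip(s, s[1:]):
--         res += ('-' + d) if (int(p) % 2 == 1 or int(d) % 2 == 1) else d
--     return res
-- ===== Notes on version B (the rewrite author's own statement) =====
-- stated objective: simpler
-- what changed: B builds the result in one pass over adjacent digit pairs, inserting a dash exactly when the previous or current digit is odd, instead of A's wrap-every-odd-digit-in-dashes followed by strip-ends and replace('--','-') cleanup.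
import Mathlib
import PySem

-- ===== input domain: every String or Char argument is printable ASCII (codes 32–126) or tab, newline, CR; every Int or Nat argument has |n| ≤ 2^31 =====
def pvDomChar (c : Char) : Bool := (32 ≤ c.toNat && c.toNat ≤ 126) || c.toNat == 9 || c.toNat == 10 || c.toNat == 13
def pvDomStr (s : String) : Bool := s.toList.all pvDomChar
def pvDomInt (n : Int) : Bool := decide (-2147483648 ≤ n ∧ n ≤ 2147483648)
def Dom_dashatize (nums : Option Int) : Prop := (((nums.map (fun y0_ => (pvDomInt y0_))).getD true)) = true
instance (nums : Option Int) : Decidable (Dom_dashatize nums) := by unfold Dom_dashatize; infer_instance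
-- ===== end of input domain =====

-- B replaces A's wrap-all-odd-digits-then-strip-and-replace cleanup by a single pass that
-- inserts each dash directly from the adjacent digit pair (simpler; same cost).

-- ===== PORT A =====
-- shared by both ports: Python's 'int(digit) % 2 == 1' on a one-character digit string
def pyDigitOdd (c : Char) : Bool :=
  PySem.Int.mod ((PySem.Int.ofChars? [c]).getD 0) 2 == 1

def dashatize (nums : Option Int) : String :=
  match nums with
  | none => "None"
  | some n0 =>
    let n := if n0 < 0 then |n0| else n0
    let digits : List Char := PySem.Int.toChars n
    let s0 : List Char := digits.foldl
      (fun acc d => if pyDigitOdd d then acc ++ ['-', d, '-'] else acc ++ [d]) []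
    -- dashtize_nums[0] / dashtize_nums[-1]: s0 is never empty, so Python never raises here
    let s1 := if PySem.List.pyGet? s0 0 == some '-' then PySem.List.slice s0 (some 1) none else s0
    let s2 := if PySem.List.pyGet? s1 (-1) == some '-' then PySem.List.slice s1 none (some (-1)) else s1
    String.mk (PySem.Chars.replace s2 ['-', '-'] ['-'])

-- ===== PORT B =====
def dashatize_alt (nums : Option Int) : String :=
  match nums with
  | none => "None"
  | some n =>
    let s : List Char := PySem.Int.toChars |n|
    match s with
    | [] => ""   -- unreachable: str(abs(n)) is never empty
    | h :: t =>
      String.mk (((h :: t).zip t).foldl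
        (fun acc pd => if pyDigitOdd pd.1 || pyDigitOdd pd.2 then acc ++ ['-', pd.2] else acc ++ [pd.2])
        [h])

-- ===== PRECONDITION & SPEC =====
def Spec_dashatize (nums : Option Int) (out : String) : Prop := out = dashatize_alt nums
instance (nums : Option Int) (out : String) : Decidable (Spec_dashatize nums out) := by unfold Spec_dashatize; infer_instance

-- ===== CLAIM (what is proved, stated in full; the proofs are below) =====
def Claim_equal_dashatize : Prop := ∀ (nums : Option Int), Dom_dashatize nums → Spec_dashatize nums (dashatize nums)

-- ===== LEMMAS AND PROOFS =====

-- A's loop body as a per-digit block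
def blockOf (c : Char) : List Char := if pyDigitOdd c then ['-', c, '-'] else [c]
def segS (t : List Char) : List Char := (t.map blockOf).flatten
-- the tail string right after a digit p: a pending dash iff p is odd, then the rest
def segH (p : Char) (t : List Char) : List Char := (if pyDigitOdd p then ['-'] else []) ++ segS t
-- B's loop as structural recursion carrying the previous digit
def segG (p : Char) : List Char → List Char
  | [] => []
  | d :: t => (if pyDigitOdd p || pyDigitOdd d then ['-', d] else [d]) ++ segG d t
-- A's trailing-dash strip
def stripR (xs : List Char) : List Char :=
  if PySem.List.pyGet? xs (-1) == some '-' then PySem.List.slice xs none (some (-1)) else xs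
-- Python's s.replace('--','-') as a left-to-right scanner
def repDD : List Char → List Char
  | [] => []
  | '-' :: '-' :: t => '-' :: repDD t
  | c :: t => c :: repDD t

theorem foldA_eq (ds : List Char) : ∀ acc : List Char,
    ds.foldl (fun acc d => if pyDigitOdd d then acc ++ ['-', d, '-'] else acc ++ [d]) acc
      = acc ++ segS ds := by
  induction ds with
  | nil => intro acc; simp [segS]
  | cons d t ih =>
    intro acc
    simp only [List.foldl_cons, ih, segS, List.map_cons, List.flatten_cons, blockOf]
    by_cases h : pyDigitOdd d = true <;> simp [h]

theorem foldB_eq (t : List Char) : ∀ (p : Char) (acc : List Char),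
    ((p :: t).zip t).foldl
      (fun acc pd => if pyDigitOdd pd.1 || pyDigitOdd pd.2 then acc ++ ['-', pd.2] else acc ++ [pd.2]) acc
      = acc ++ segG p t := by
  induction t with
  | nil => intro p acc; simp [segG]
  | cons d t ih =>
    intro p acc
    simp only [List.zip_cons_cons, List.foldl_cons, ih, segG]
    by_cases h : (pyDigitOdd p || pyDigitOdd d) = true <;> simp [h]

theorem repDD_dd (t : List Char) : repDD ('-' :: '-' :: t) = '-' :: repDD t := rfl

theorem repDD_cons (c : Char) (t : List Char)
    (h : ¬ (c = '-' ∧ ∃ t2, t = '-' :: t2)) : repDD (c :: t) = c :: repDD t := by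
  rw [repDD.eq_def]
  split
  · simp_all
  · rename_i t2 heq
    obtain ⟨rfl, rfl⟩ := List.cons_eq_cons.mp heq
    exact absurd ⟨rfl, t2, rfl⟩ h
  · rename_i c' t' _ heq
    obtain ⟨rfl, rfl⟩ := List.cons_eq_cons.mp heq
    rfl

theorem repDD_cons_ne (c : Char) (t : List Char) (h : c ≠ '-') :
    repDD (c :: t) = c :: repDD t :=
  repDD_cons c t (by rintro ⟨rfl, _⟩; exact h rfl)

theorem repDD_dash_cons_ne (c : Char) (t : List Char) (h : c ≠ '-') :
    repDD ('-' :: c :: t) = '-' :: repDD (c :: t) :=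
  repDD_cons '-' (c :: t) (by rintro ⟨-, t2, he⟩; exact h (List.head_eq_of_cons_eq he))

theorem go_eq (fuel : Nat) : ∀ (l acc : List Char), l.length ≤ fuel →
    PySem.Chars.replace.go ['-', '-'] ['-'] fuel l acc = acc.reverse ++ repDD l := by
  induction fuel with
  | zero =>
    intro l acc hl
    have : l = [] := List.eq_nil_of_length_eq_zero (Nat.le_zero.mp hl)
    subst this; simp [PySem.Chars.replace.go, repDD]
  | succ f ih =>
    intro l acc hl
    cases l with
    | nil => simp [PySem.Chars.replace.go, repDD]
    | cons c t =>
      rw [PySem.Chars.replace.go]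
      by_cases hp : (['-', '-'].isPrefixOf (c :: t)) = true
      · have hpre : ['-', '-'] <+: c :: t := List.isPrefixOf_iff_prefix.mp hp
        obtain ⟨r, hr⟩ := hpre
        simp only [List.cons_append, List.nil_append] at hr
        injection hr with h1 h2
        subst h1; subst h2
        simp only [hp, if_true]
        rw [show List.drop (['-', '-'].length) ('-' :: '-' :: r) = r from rfl,
          ih r _ (by simp at hl ⊢; omega)]
        simp [repDD_dd]
      · simp only [hp]
        rw [if_neg (by simp), ih t (c :: acc) (by simpa using Nat.le_of_succ_le_succ hl)]
        have hcons : repDD (c :: t) = c :: repDD t := by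
          apply repDD_cons
          rintro ⟨rfl, t2, rfl⟩
          exact hp (by simp [List.isPrefixOf])
        simp [hcons]

theorem replace_eq_repDD (s : List Char) :
    PySem.Chars.replace s ['-', '-'] ['-'] = repDD s := by
  rw [PySem.Chars.replace]
  simp only [List.isEmpty_cons]
  simpa using go_eq s.length s []

theorem stripR_cons (x : Char) (xs : List Char) (h : xs ≠ []) :
    stripR (x :: xs) = x :: stripR xs := by
  obtain ⟨y, ys, rfl⟩ := List.exists_cons_of_ne_nil h
  unfold stripR
  rw [PySem.List.pyGet?_neg_one, PySem.List.pyGet?_neg_one, List.getLast?_cons_cons,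
    PySem.List.slice_to_neg_one, PySem.List.slice_to_neg_one,
    List.dropLast_cons_of_ne_nil (List.cons_ne_nil y ys)]
  split <;> rfl

theorem segH_cons (p d : Char) (t : List Char) :
    segH p (d :: t) = (if pyDigitOdd p then ['-'] else [])
      ++ (if pyDigitOdd d then ['-', d] else [d]) ++ segH d t := by
  unfold segH segS blockOf
  by_cases h : pyDigitOdd d = true <;> simp [h]

theorem segH_eq_nil_iff (d : Char) (t : List Char) :
    segH d t = [] ↔ (pyDigitOdd d = false ∧ t = []) := by
  unfold segH segS
  by_cases h : pyDigitOdd d = true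
  · simp [h]
  · cases t with
    | nil => simp [h]
    | cons x xs =>
      simp only [h, Bool.not_eq_true] at *
      unfold blockOf
      by_cases hx : pyDigitOdd x = true <;> simp [hx]

theorem main_lemma (t : List Char) : ∀ p : Char, (∀ c ∈ t, c ≠ '-') →
    repDD (stripR (segH p t)) = segG p t := by
  induction t with
  | nil =>
    intro p _
    unfold segH segS segG stripR
    cases h : pyDigitOdd p <;> simp [h] <;> rfl
  | cons d t ih =>
    intro p hnd
    have hd : d ≠ '-' := hnd d (List.mem_cons_self ..)
    have hnt : ∀ c ∈ t, c ≠ '-' := fun c hc => hnd c (List.mem_cons_of_mem _ hc)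
    rw [segH_cons]
    by_cases hH : segH d t = []
    · -- d even and t = []: the string ends in the digit d, nothing stripped or replaced
      obtain ⟨hde, rfl⟩ := (segH_eq_nil_iff d t).mp hH
      rw [hH]
      cases hp : pyDigitOdd p <;>
        simp only [hp, hde, Bool.false_eq_true, if_false, if_true, Bool.or_false,
          Bool.false_or, Bool.true_or, List.append_nil, List.cons_append, List.nil_append, segG]
      · unfold stripR
        rw [PySem.List.pyGet?_neg_one]
        simp only [List.getLast?_singleton]
        rw [if_neg (by simp [hd]), repDD_cons_ne d [] hd]; rfl
      · unfold stripR
        rw [PySem.List.pyGet?_neg_one]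
        simp only [List.getLast?_cons_cons, List.getLast?_singleton]
        rw [if_neg (by simp [hd]), repDD_dash_cons_ne d [] hd, repDD_cons_ne d [] hd]; rfl
    · -- general step: strip acts inside segH d t, replace walks through the explicit prefix
      have ihd := ih d hnt
      cases hp : pyDigitOdd p <;> cases hdo : pyDigitOdd d <;>
        simp only [hp, hdo, Bool.false_eq_true, if_false, if_true, Bool.true_or,
          Bool.false_or, List.cons_append, List.nil_append, segG]
      · rw [stripR_cons _ _ hH, repDD_cons_ne d _ hd, ihd]
      · rw [stripR_cons _ _ (by simp), stripR_cons _ _ hH,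
          repDD_dash_cons_ne d _ hd, repDD_cons_ne d _ hd, ihd]
      · rw [stripR_cons _ _ (by simp), stripR_cons _ _ hH,
          repDD_dash_cons_ne d _ hd, repDD_cons_ne d _ hd, ihd]
      · rw [stripR_cons _ _ (by simp), stripR_cons _ _ (by simp), stripR_cons _ _ hH,
          repDD_dd, repDD_cons_ne d _ hd, ihd]

theorem digitChar_ne_dash (k : Nat) : Nat.digitChar k ≠ '-' := by
  rcases Nat.lt_or_ge k 16 with h | h
  · interval_cases k <;> decide
  · rw [Nat.digitChar]
    repeat rw [if_neg (by omega)]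
    decide

theorem toDigitsCore_ne_dash (f : Nat) : ∀ (n : Nat) (l : List Char),
    (∀ c ∈ l, c ≠ '-') → ∀ c ∈ Nat.toDigitsCore 10 f n l, c ≠ '-' := by
  induction f with
  | zero => intro n l hl; simpa [Nat.toDigitsCore] using hl
  | succ f ih =>
    intro n l hl c hc
    rw [Nat.toDigitsCore] at hc
    by_cases h : n / 10 = 0
    · rw [if_pos h] at hc
      rcases List.mem_cons.mp hc with rfl | hm
      · exact digitChar_ne_dash _
      · exact hl c hm
    · rw [if_neg h] at hc
      exact ih (n / 10) _ (by
        intro c' hc'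
        rcases List.mem_cons.mp hc' with rfl | hm
        · exact digitChar_ne_dash _
        · exact hl c' hm) c hc

theorem toDigits_ne_dash (m : Nat) : ∀ c ∈ Nat.toDigits 10 m, c ≠ '-' :=
  toDigitsCore_ne_dash _ m [] (by simp)

theorem toDigitsCore_succ_ne_nil (f : Nat) : ∀ (n : Nat) (l : List Char),
    Nat.toDigitsCore 10 (f + 1) n l ≠ [] := by
  induction f with
  | zero =>
    intro n l
    rw [Nat.toDigitsCore]
    split <;> simp [Nat.toDigitsCore]
  | succ f ih =>
    intro n l
    rw [Nat.toDigitsCore]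
    split
    · simp
    · exact ih _ _

theorem toDigits_ne_nil (m : Nat) : Nat.toDigits 10 m ≠ [] := by
  unfold Nat.toDigits
  exact toDigitsCore_succ_ne_nil m m []

-- the whole pipeline, for an arbitrary dash-free nonempty digit list
theorem pipeline_eq (h : Char) (t : List Char) (hh : h ≠ '-') (ht : ∀ c ∈ t, c ≠ '-') :
    PySem.Chars.replace
      (stripR (if PySem.List.pyGet? (segS (h :: t)) 0 == some '-'
        then PySem.List.slice (segS (h :: t)) (some 1) none else segS (h :: t)))
      ['-', '-'] ['-']
      = h :: segG h t := by
  have hS : segS (h :: t) = blockOf h ++ segS t := by simp [segS]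
  have hstripL : (if PySem.List.pyGet? (segS (h :: t)) 0 == some '-'
      then PySem.List.slice (segS (h :: t)) (some 1) none else segS (h :: t)) = h :: segH h t := by
    rw [hS]
    unfold blockOf segH
    cases ho : pyDigitOdd h <;>
      simp only [ho, Bool.false_eq_true, if_false, if_true, List.cons_append, List.nil_append]
    · rw [PySem.List.pyGet?_zero_cons, if_neg (by simp [hh])]
    · rw [PySem.List.pyGet?_zero_cons, if_pos (by simp), PySem.List.slice_from_one]
      simp
  rw [hstripL, replace_eq_repDD]
  by_cases hH : segH h t = []
  · obtain ⟨hhe, rfl⟩ := (segH_eq_nil_iff h t).mp hH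
    rw [hH]
    unfold stripR
    rw [PySem.List.pyGet?_neg_one]
    simp only [List.getLast?_singleton]
    rw [if_neg (by simp [hh]), repDD_cons_ne h [] hh]
    rfl
  · rw [stripR_cons h _ hH, repDD_cons_ne h _ hh, main_lemma t h ht]

-- ===== VERDICT (by name: the statement is the Claim_ definition above) =====
theorem dashatize_spec : Claim_equal_dashatize := by
  unfold Claim_equal_dashatize
  intro nums _
  unfold Spec_dashatize dashatize dashatize_alt
  cases nums with
  | none => rfl
  | some n0 =>
    simp only
    have habs : (if n0 < 0 then |n0| else n0) = |n0| := by
      split <;> [rfl; exact (abs_of_nonneg (by omega)).symm]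
    rw [habs]
    have htc : PySem.Int.toChars |n0| = Nat.toDigits 10 (|n0|).toNat := by
      unfold PySem.Int.toChars
      rw [if_neg (not_lt.mpr (abs_nonneg n0))]
    set ds := PySem.Int.toChars |n0| with hds
    have hnd : ∀ c ∈ ds, c ≠ '-' := by rw [htc]; exact toDigits_ne_dash _
    have hne : ds ≠ [] := by rw [htc]; exact toDigits_ne_nil _
    cases hd : ds with
    | nil => exact absurd hd hne
    | cons h t =>
      have hh : h ≠ '-' := hnd h (hd ▸ List.mem_cons_self ..)
      have ht : ∀ c ∈ t, c ≠ '-' := fun c hc => hnd c (hd ▸ List.mem_cons_of_mem _ hc)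
      rw [foldA_eq (h :: t) []]
      dsimp only
      rw [foldB_eq t h [h]]
      simp only [List.nil_append]
      have := pipeline_eq h t hh ht
      unfold stripR at this
      rw [this]
      rfl
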